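-- pv_equiv track=rewrite | github.com/AlecRosenbaum/adventofcode2018 | 2/solution.py | solution_part_one
-- ===== SOURCE A (Python) =====
-- from collections import defaultdict
--
-- def solution_part_one(arg):
--     n_letters_total = defaultdict(int)
--
--     for box_id in arg.split():
--         n_letters = defaultdict(int)
--         for i in box_id:
--             n_letters[i] += 1
--
--         for v in set(n_letters.values()):
--             n_letters_total[v] += 1
--
--     return n_letters_total[2] * n_letters_total[3]
-- ===== SOURCE B (Python) =====
-- def run_lengths(s):
--     # run-length encode an already-sorted list of characters
--     if not s:
--         return []
--     head = s[0]
--     n = 1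
--     while n < len(s) and s[n] == head:
--         n += 1
--     return [n] + run_lengths(s[n:])
--
-- def solution_part_one(arg):
--     twos = 0
--     threes = 0
--     for w in arg.split():
--         runs = run_lengths(sorted(w))
--         if 2 in runs:
--             twos += 1
--         if 3 in runs:
--             threes += 1
--     return twos * threes
-- ===== Notes on version B (the rewrite author's own statement) =====
-- stated objective: alternative
-- what changed: Instead of A's per-id hash-map letter counting feeding a frequency-of-frequencies table indexed at 2 and 3, B sorts each id and run-length encodes the sorted characters by recursive scanning, tallying ids whose run lengths contain 2 resp. 3 and multiplying the two tallies.
import Mathlib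
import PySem

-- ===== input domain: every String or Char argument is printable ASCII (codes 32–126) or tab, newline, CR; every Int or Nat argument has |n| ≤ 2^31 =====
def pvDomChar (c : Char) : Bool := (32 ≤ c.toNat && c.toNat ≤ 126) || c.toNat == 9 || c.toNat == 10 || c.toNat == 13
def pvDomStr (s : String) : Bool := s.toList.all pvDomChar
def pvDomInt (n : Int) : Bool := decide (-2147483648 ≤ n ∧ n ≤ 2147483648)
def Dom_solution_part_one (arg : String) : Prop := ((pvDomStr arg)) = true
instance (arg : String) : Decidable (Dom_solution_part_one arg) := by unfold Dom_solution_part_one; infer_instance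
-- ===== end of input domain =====

-- B replaces A's per-id hash counting plus frequency-of-frequencies table with
-- sorting each id and run-length encoding it, tallying ids whose runs contain 2 resp. 3.

-- ===== PORT A =====
def solution_part_one (arg : String) : Int :=
  let total : PySem.Dict Int Int :=
    (PySem.Str.split₀ arg).foldl (fun tot box_id =>
      let n_letters : PySem.Dict Char Int :=
        box_id.toList.foldl (fun d c => d.modify c 0 (· + 1)) PySem.Dict.empty
      (PySem.Set.ofList n_letters.values).foldl (fun t v => t.modify v 0 (· + 1)) tot)
      PySem.Dict.empty
  total.getD 2 0 * total.getD 3 0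

-- ===== PORT B =====
-- run-length encode an already-sorted list of characters (Source B's recursive run_lengths)
def runLengths : List Char → List Int
  | [] => []
  | c :: cs =>
    ((cs.takeWhile (· == c)).length + 1 : Int) :: runLengths (cs.dropWhile (· == c))
termination_by s => s.length
decreasing_by
  exact Nat.lt_succ_of_le (List.length_dropWhile_le _ _)

def runsOf (w : String) : List Int :=
  runLengths (PySem.List.sorted w.toList (fun c => c) false)

def bStep (acc : Int × Int) (w : String) : Int × Int :=
  let runs := runsOf w
  (if runs.contains 2 then acc.1 + 1 else acc.1,
   if runs.contains 3 then acc.2 + 1 else acc.2)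

def solution_part_one_alt (arg : String) : Int :=
  let res := (PySem.Str.split₀ arg).foldl bStep (0, 0)
  res.1 * res.2

-- ===== PRECONDITION & SPEC =====
def Spec_solution_part_one (arg : String) (out : Int) : Prop := out = solution_part_one_alt arg
instance (arg : String) (out : Int) : Decidable (Spec_solution_part_one arg out) := by unfold Spec_solution_part_one; infer_instance

-- ===== CLAIM (what is proved, stated in full; the proofs are below) =====
def Claim_equal_solution_part_one : Prop := ∀ (arg : String), Dom_solution_part_one arg → Spec_solution_part_one arg (solution_part_one arg)

-- ===== LEMMAS AND PROOFS =====

-- A's outer fold's table, read at k, adds up the per-id counts of k among the distinct letter-counts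
theorem total_getD (V : String → List Int) (ids : List String) (d : PySem.Dict Int Int) (k : Int) :
    (ids.foldl (fun tot box => (V box).foldl (fun t v => t.modify v 0 (· + 1)) tot) d).getD k 0
      = d.getD k 0 + ((ids.map (fun box => ((V box).count k : Int))).sum) := by
  induction ids generalizing d with
  | nil => simp
  | cons w ws ih =>
    simp only [List.foldl_cons, List.map_cons, List.sum_cons, ih,
      PySem.Dict.getD_foldl_modify_add_one]
    ring

theorem sum_indicator (p : String → Bool) (ids : List String) :
    (ids.map (fun w => (if p w then (1 : Int) else 0))).sum = (ids.countP p : Int) := by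
  induction ids with
  | nil => simp
  | cons w ws ih =>
    simp only [List.map_cons, List.sum_cons, List.countP_cons, ih]
    by_cases h : p w = true
    · simp [h]; ring
    · simp [h]

theorem set_count_eq (xs : List Int) (k : Int) :
    ((PySem.Set.ofList xs).count k : Int) = if xs.contains k then (1 : Int) else 0 := by
  by_cases h : k ∈ xs
  · rw [List.count_eq_one_of_mem (PySem.Set.nodup_ofList xs)
      ((PySem.Set.mem_ofList xs k).mpr h)]
    simp [h]
  · rw [List.count_eq_zero_of_not_mem (fun hc => h ((PySem.Set.mem_ofList xs k).mp hc))]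
    simp [h]

theorem getD_eq_countP (ids : List String) (k : Int) :
    ((ids.foldl (fun tot box =>
        (PySem.Set.ofList (PySem.Dict.counter box.toList).values).foldl
          (fun t v => t.modify v 0 (· + 1)) tot) PySem.Dict.empty).getD k 0)
      = (ids.countP (fun w => (PySem.Dict.counter w.toList).values.contains k) : Int) := by
  rw [total_getD (fun box => PySem.Set.ofList (PySem.Dict.counter box.toList).values)]
  rw [← sum_indicator (fun w => (PySem.Dict.counter w.toList).values.contains k)]
  simp only [PySem.Dict.getD_empty, zero_add]
  refine congrArg List.sum (List.map_congr_left fun w _ => ?_)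
  rw [set_count_eq]

-- run lengths of a sorted list are exactly the multiplicities of its members
theorem mem_runLengths : ∀ (s : List Char), s.Pairwise (· ≤ ·) → ∀ n : Int,
    (n ∈ runLengths s ↔ ∃ c ∈ s, (s.count c : Int) = n) := by
  intro s
  induction s using runLengths.induct with
  | case1 => simp [runLengths]
  | case2 c cs ih =>
    intro hs n
    have hle : ∀ x ∈ cs, c ≤ x := (List.pairwise_cons.mp hs).1
    have hcs : cs.Pairwise (· ≤ ·) := (List.pairwise_cons.mp hs).2
    have hdwp : (cs.dropWhile (· == c)).Pairwise (· ≤ ·) :=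
      List.Pairwise.sublist (List.dropWhile_sublist _) hcs
    have htw : ∀ x ∈ cs.takeWhile (· == c), x = c := fun x hx =>
      beq_iff_eq.mp (List.mem_takeWhile_imp (p := (· == c)) hx)
    have hnot : ∀ x ∈ cs.dropWhile (· == c), c < x := by
      intro x hx
      rcases hdw : cs.dropWhile (· == c) with _ | ⟨d, rest⟩
      · rw [hdw] at hx
        exact absurd hx List.not_mem_nil
      · have hd : (d == c) = false := by
          have h' := List.head?_dropWhile_not (· == c) cs
          rw [hdw] at h'
          simpa using h'
        have hdin : d ∈ cs.dropWhile (· == c) := by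
          rw [hdw]; exact List.mem_cons_self
        have hdc : c < d :=
          lt_of_le_of_ne (hle d ((List.dropWhile_sublist _).mem hdin))
            (fun h => by simp [h.symm] at hd)
        rw [hdw] at hx
        rcases List.mem_cons.mp hx with rfl | hx'
        · exact hdc
        · exact lt_of_lt_of_le hdc
            ((List.pairwise_cons.mp (hdw ▸ hdwp)).1 x hx')
    have hsplit : cs.takeWhile (· == c) ++ cs.dropWhile (· == c) = cs :=
      List.takeWhile_append_dropWhile
    have hcount : (c :: cs).count c = (cs.takeWhile (· == c)).length + 1 := by
      have h1 : (cs.takeWhile (· == c)).count c = (cs.takeWhile (· == c)).length :=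
        List.count_eq_length.mpr (fun b hb => (htw b hb).symm)
      have h2 : (cs.dropWhile (· == c)).count c = 0 :=
        List.count_eq_zero.mpr (fun hc => lt_irrefl c (hnot c hc))
      have h3 : List.count c cs = (cs.takeWhile (· == c)).length := by
        conv_lhs => rw [← hsplit]
        rw [List.count_append, h1, h2, Nat.add_zero]
      rw [List.count_cons_self, h3]
    have hcount2 : ∀ x ∈ cs.dropWhile (· == c),
        (c :: cs).count x = (cs.dropWhile (· == c)).count x := by
      intro x hx
      have hxc : x ≠ c := fun h => lt_irrefl c (h ▸ hnot x hx)
      have h1 : (cs.takeWhile (· == c)).count x = 0 :=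
        List.count_eq_zero.mpr (fun hc => hxc (htw x hc))
      have h2' : List.count x cs = List.count x (cs.dropWhile (· == c)) := by
        conv_lhs => rw [← hsplit]
        rw [List.count_append, h1, Nat.zero_add]
      rw [List.count_cons_of_ne hxc.symm, h2']
    rw [show runLengths (c :: cs)
        = ((cs.takeWhile (· == c)).length + 1 : Int) :: runLengths (cs.dropWhile (· == c))
      from by rw [runLengths]]
    constructor
    · intro hmem
      rcases List.mem_cons.mp hmem with rfl | hm
      · exact ⟨c, List.mem_cons_self, by rw [hcount]; push_cast; ring⟩
      · obtain ⟨x, hx, hxn⟩ := (ih hdwp n).mp hm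
        exact ⟨x, List.mem_cons_of_mem _ ((List.dropWhile_sublist _).mem hx),
          by rw [hcount2 x hx]; exact hxn⟩
    · rintro ⟨c', hc', rfl⟩
      by_cases h : c' = c
      · rw [h, show ((c :: cs).count c : Int)
              = ((cs.takeWhile (· == c)).length + 1 : Int) from by rw [hcount]; push_cast; ring]
        exact List.mem_cons_self
      · have hc'cs : c' ∈ cs := (List.mem_cons.mp hc').resolve_left h
        have hc'dw : c' ∈ cs.dropWhile (· == c) := by
          rcases (List.mem_append.mp (hsplit ▸ hc'cs)) with htw' | hdw'
          · exact absurd (htw c' htw') h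
          · exact hdw'
        exact List.mem_cons_of_mem _
          ((ih hdwp _).mpr ⟨c', hc'dw, by rw [hcount2 c' hc'dw]⟩)

-- per id: the run lengths of the sorted id contain k iff k is a value of its letter Counter
theorem runs_eq_values (w : String) (k : Int) :
    (runsOf w).contains k = (PySem.Dict.counter w.toList).values.contains k := by
  apply Bool.eq_iff_iff.mpr
  simp only [List.contains_iff_mem, runsOf]
  rw [mem_runLengths _ (PySem.List.sorted_pairwise w.toList (fun c => c)) k]
  have hperm := PySem.List.sorted_perm w.toList (fun c => c) false
  simp only [PySem.Dict.values, PySem.Dict.items_counter, List.map_map, List.mem_map,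
    Function.comp, PySem.Set.mem_ofList]
  constructor
  · rintro ⟨c, hc, rfl⟩
    exact ⟨c, hperm.mem_iff.mp hc, by rw [hperm.count_eq]⟩
  · rintro ⟨c, hc, rfl⟩
    exact ⟨c, hperm.mem_iff.mpr hc, by rw [hperm.count_eq]⟩

theorem foldl_bStep (ids : List String) (a b : Int) :
    ids.foldl bStep (a, b)
      = (a + (ids.countP (fun w => (runsOf w).contains 2) : Int),
         b + (ids.countP (fun w => (runsOf w).contains 3) : Int)) := by
  induction ids generalizing a b with
  | nil => simp
  | cons w ws ih =>
    simp only [List.foldl_cons, bStep, List.countP_cons, ih]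
    by_cases h2 : (runsOf w).contains 2 = true <;>
      by_cases h3 : (runsOf w).contains 3 = true <;>
        simp only [h2, h3, if_true, if_false, Bool.false_eq_true, Prod.mk.injEq] <;>
          constructor <;> push_cast <;> ring

-- ===== VERDICT (by name: the statement is the Claim_ definition above) =====
theorem solution_part_one_spec : Claim_equal_solution_part_one := by
  intro arg _
  show solution_part_one arg = solution_part_one_alt arg
  unfold solution_part_one solution_part_one_alt
  simp only []
  rw [show (fun (d : PySem.Dict Char Int) (c : Char) => d.modify c 0 (· + 1)) =
    (fun d x => d.modify x 0 (· + 1)) from rfl]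
  simp only [← PySem.Dict.counter_eq_foldl]
  rw [getD_eq_countP, getD_eq_countP, foldl_bStep]
  simp only [zero_add]
  congr 2 <;>
    exact (List.countP_congr (fun w _ => by rw [runs_eq_values])).symm
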